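-- pv_equiv track=rewrite | github.com/fritzgrobbelaar/puzzles | aoc2023_4/12_1_binary_counter.py | replaceWithBinary
-- ===== SOURCE A (Python) =====
-- def replaceWithBinary(row, binaryString):
--     newString = ''
--     binaryIndex = 0
--     for value in row:
--         if value == '?':
--             value = binaryString[binaryIndex]
--             binaryIndex += 1
--         newString = newString + value
--     return newString
-- ===== SOURCE B (Python) =====
-- def replaceWithBinary(row, binaryString):
--     parts = row.split('?')
--     res = [parts[0]]
--     for i in range(len(parts) - 1):
--         res.append(binaryString[i])
--         res.append(parts[i + 1])
--     return ''.join(res)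
-- ===== Notes on version B (the rewrite author's own statement) =====
-- stated objective: faster
-- what changed: B splits the row on '?' into its text segments once and joins them interleaved with successive binary digits, instead of A's char-by-char loop with a running index and repeated string concatenation.
import Mathlib
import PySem

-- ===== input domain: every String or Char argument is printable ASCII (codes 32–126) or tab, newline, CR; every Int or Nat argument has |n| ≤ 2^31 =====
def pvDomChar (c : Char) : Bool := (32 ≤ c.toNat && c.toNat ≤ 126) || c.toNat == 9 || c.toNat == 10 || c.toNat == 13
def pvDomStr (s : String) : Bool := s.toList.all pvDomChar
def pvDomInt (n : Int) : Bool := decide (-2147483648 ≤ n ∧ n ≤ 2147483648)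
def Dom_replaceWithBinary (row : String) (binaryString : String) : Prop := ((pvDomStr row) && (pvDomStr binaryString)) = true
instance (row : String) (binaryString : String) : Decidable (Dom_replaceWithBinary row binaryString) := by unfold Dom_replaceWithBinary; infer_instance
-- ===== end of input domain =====

-- B replaces A's char-by-char loop (index counter + repeated string concatenation) by splitting
-- the row on '?' once and joining segments interleaved with successive binary digits (measured faster).


-- ===== PORT A =====
-- A's loop: for value in row: if value == '?': value = binaryString[binaryIndex]; binaryIndex += 1; newString += value
-- binaryString[binaryIndex] can raise IndexError: the loop is Option-valued (none = IndexError).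
def replaceWithBinaryLoop (binaryString : List Char) : List Char → List Char → Int → Option (List Char)
  | [], newString, _ => some newString
  | value :: rest, newString, binaryIndex =>
    if value = '?' then
      match PySem.List.pyGet? binaryString binaryIndex with
      | none => none
      | some b => replaceWithBinaryLoop binaryString rest (newString ++ [b]) (binaryIndex + 1)
    else replaceWithBinaryLoop binaryString rest (newString ++ [value]) binaryIndex

def replaceWithBinary (row : String) (binaryString : String) : String :=
  String.ofList ((replaceWithBinaryLoop binaryString.toList row.toList [] 0).getD [])

-- ===== PORT B =====
-- parts = row.split('?'); res = [parts[0]]; for i in range(len(parts)-1): res += [binaryString[i], parts[i+1]]; ''.join(res)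
def replaceWithBinaryAltGo (parts : List (List Char)) (bs : List Char) : Option (List Char) := do
  let p0 ← PySem.List.pyGet? parts 0
  let res ← (PySem.List.pyRange 0 ((parts.length : Int) - 1) 1).foldlM
      (fun (res : List (List Char)) (i : Int) => do
        let b ← PySem.List.pyGet? bs i
        let p ← PySem.List.pyGet? parts (i + 1)
        pure (res ++ [[b], p])) [p0]
  pure res.flatten

def replaceWithBinary_alt (row : String) (binaryString : String) : String :=
  String.ofList ((replaceWithBinaryAltGo (PySem.Chars.splitOn row.toList ['?']) binaryString.toList).getD [])

-- ===== PRECONDITION & SPEC =====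
-- Pre_ excludes exactly the inputs on which Python A raises IndexError: more '?' in row than characters in binaryString.
def Pre_replaceWithBinary (row : String) (binaryString : String) : Prop :=
  row.toList.count '?' ≤ binaryString.toList.length
instance (row : String) (binaryString : String) : Decidable (Pre_replaceWithBinary row binaryString) := by
  unfold Pre_replaceWithBinary; infer_instance
def pvWitness_replaceWithBinary : String × String := ("a?b?c", "10")

def Spec_replaceWithBinary (row : String) (binaryString : String) (out : String) : Prop := out = replaceWithBinary_alt row binaryString
instance (row : String) (binaryString : String) (out : String) : Decidable (Spec_replaceWithBinary row binaryString out) := by unfold Spec_replaceWithBinary; infer_instance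

-- ===== CLAIM (what is proved, stated in full; the proofs are below) =====
def Claim_equal_replaceWithBinary : Prop := ∀ (row : String) (binaryString : String), Dom_replaceWithBinary row binaryString → Pre_replaceWithBinary row binaryString → Spec_replaceWithBinary row binaryString (replaceWithBinary row binaryString)

-- ===== LEMMAS AND PROOFS =====

-- Common specification both ports are reduced to: replace '?'s by successive binary chars,
-- none exactly where the binary chars run out at a '?' (= Python's IndexError).
def rwbSpec : List Char → List Char → Option (List Char)
  | [], _ => some []
  | c :: r, bs =>
    if c = '?' then
      match bs with
      | [] => none
      | b :: bs' => (rwbSpec r bs').map (b :: ·)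
    else (rwbSpec r bs).map (c :: ·)

-- simple recursive characterisation of split-on-'?'
def rwbSplit : List Char → List (List Char)
  | [] => [[]]
  | c :: r => if c = '?' then [] :: rwbSplit r else (c :: (rwbSplit r).headI) :: (rwbSplit r).tail

def rwbConsHead (p : List Char) : List (List Char) → List (List Char)
  | [] => [p]
  | q :: qs => (p ++ q) :: qs

-- glue the tail segments with successive binary chars
def rwbWeave : List (List Char) → List Char → Option (List Char)
  | [], _ => some []
  | p :: ps, bs =>
    match bs with
    | [] => none
    | b :: bs' => (rwbWeave ps bs').map (fun t => b :: (p ++ t))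

theorem rwbSplit_ne_nil (cs : List Char) : rwbSplit cs ≠ [] := by
  cases cs with
  | nil => simp [rwbSplit]
  | cons c r => simp only [rwbSplit]; split <;> simp

theorem rwbConsHead_nil (xs : List (List Char)) (h : xs ≠ []) : rwbConsHead [] xs = xs := by
  cases xs with
  | nil => exact absurd rfl h
  | cons q qs => simp [rwbConsHead]

theorem splitOn_go_spec (fuel : Nat) : ∀ (l cur : List Char) (accs : List (List Char)),
    l.length < fuel →
    PySem.Chars.splitOn.go ['?'] fuel l cur accs.reverse
      = accs ++ rwbConsHead cur.reverse (rwbSplit l) := by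
  induction fuel with
  | zero => intro l cur accs h; omega
  | succ f ih =>
    intro l cur accs h
    cases l with
    | nil =>
      rw [PySem.Chars.splitOn.go]
      simp [rwbSplit, rwbConsHead]
      omega
    | cons c rest =>
      rw [PySem.Chars.splitOn.go]
      by_cases hc : c = '?'
      · subst hc
        have hpre : List.isPrefixOf ['?'] ('?' :: rest) = true := by simp [List.isPrefixOf]
        simp only [hpre, if_pos]
        have h2 : (cur.reverse :: accs.reverse) = (accs ++ [cur.reverse]).reverse := by simp
        rw [h2]
        simp only [List.length_nil, List.length_cons, Nat.zero_add, List.drop_succ_cons, List.drop_zero]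
        have := ih rest [] (accs ++ [cur.reverse]) (by simp at h ⊢; omega)
        rw [this, List.reverse_nil, rwbConsHead_nil _ (rwbSplit_ne_nil rest)]
        simp [rwbSplit, rwbConsHead]
      · have hpre : List.isPrefixOf ['?'] (c :: rest) = false := by
          simp [List.isPrefixOf]; exact fun hh => hc hh.symm
        simp only [hpre, Bool.false_eq_true, if_neg, not_false_iff]
        have := ih rest (c :: cur) accs (by simp at h ⊢; omega)
        rw [this]
        rcases hsp : rwbSplit rest with _ | ⟨q, qs⟩
        · exact absurd hsp (rwbSplit_ne_nil rest)
        · simp [rwbSplit, hc, hsp, rwbConsHead, List.headI]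

theorem splitOn_eq_rwbSplit (cs : List Char) :
    PySem.Chars.splitOn cs ['?'] = rwbSplit cs := by
  have := splitOn_go_spec (cs.length + 1) cs [] [] (by omega)
  simp only [List.reverse_nil] at this
  rw [PySem.Chars.splitOn, this]
  simp [rwbConsHead_nil _ (rwbSplit_ne_nil cs)]

theorem loopA_spec (bs : List Char) : ∀ (cs acc : List Char) (k : Nat),
    replaceWithBinaryLoop bs cs acc (k : Int)
      = (rwbSpec cs (bs.drop k)).map (acc ++ ·) := by
  intro cs
  induction cs with
  | nil => intro acc k; simp [replaceWithBinaryLoop, rwbSpec]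
  | cons c r ih =>
    intro acc k
    by_cases hc : c = '?'
    · subst hc
      simp only [replaceWithBinaryLoop, rwbSpec]
      have hg : PySem.List.pyGet? bs (k : Int) = bs[k]? := by
        simp [PySem.List.pyGet?_natCast]
      rw [hg]
      rcases hdrop : bs.drop k with _ | ⟨b, rest⟩
      · have : bs[k]? = none := by
          rw [List.getElem?_eq_none_iff]
          have := List.drop_eq_nil_iff.mp hdrop
          omega
        simp [this]
      · have hb : bs[k]? = some b := by
          have h0 := (List.getElem?_drop (i := k) (j := 0) (xs := bs)).symm
          simp only [hdrop, Nat.add_zero] at h0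
          simpa using h0
        have : ((k : Int) + 1) = ((k + 1 : Nat) : Int) := by push_cast; ring
        rw [hb, this]
        simp only [ih (acc ++ [b]) (k + 1)]
        have hdrop1 : bs.drop (k + 1) = rest := by
          have h1 : bs.drop (k + 1) = (bs.drop k).drop 1 := by
            rw [List.drop_drop (i := 1) (j := k) (l := bs)]
          rw [h1, hdrop]
          rfl
        rw [hdrop1]
        cases rwbSpec r rest <;> simp
    · simp only [replaceWithBinaryLoop, rwbSpec, if_neg hc]
      rw [ih (acc ++ [c]) k]
      cases rwbSpec r (bs.drop k) <;> simp

theorem weave_spec : ∀ (cs bs : List Char) (h : List Char) (t : List (List Char)),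
    rwbSplit cs = h :: t → rwbSpec cs bs = (rwbWeave t bs).map (h ++ ·) := by
  intro cs
  induction cs with
  | nil =>
    intro bs h t hsp
    simp [rwbSplit] at hsp
    obtain ⟨rfl, rfl⟩ := hsp
    simp [rwbSpec, rwbWeave]
  | cons c r ih =>
    intro bs h t hsp
    by_cases hc : c = '?'
    · subst hc
      simp only [rwbSplit, if_true] at hsp
      obtain ⟨rfl, rfl⟩ := List.cons_eq_cons.mp hsp
      rcases hsr : rwbSplit r with _ | ⟨h', t'⟩
      · exact absurd hsr (rwbSplit_ne_nil r)
      · simp only [rwbSpec, if_true]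
        cases bs with
        | nil => simp [rwbWeave]
        | cons b bs' =>
          have hih := ih bs' h' t' hsr
          simp only [rwbWeave, hih]
          cases rwbWeave t' bs' <;> simp
    · rcases hsr : rwbSplit r with _ | ⟨h', t'⟩
      · exact absurd hsr (rwbSplit_ne_nil r)
      · simp only [rwbSplit, if_neg hc, hsr] at hsp
        obtain ⟨rfl, rfl⟩ := List.cons_eq_cons.mp hsp
        simp only [rwbSpec, if_neg hc]
        rw [ih bs h' t' hsr]
        cases hw : rwbWeave t' bs <;> simp [hw]

theorem foldB (q : List Char) (qs : List (List Char)) (bs : List Char) : ∀ (j : Nat) (res : List (List Char)),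
    (((PySem.List.pyRange (j : Int) ((qs.length : Nat) : Int) 1).foldlM
      (fun (res : List (List Char)) (i : Int) => do
        let b ← PySem.List.pyGet? bs i
        let p ← PySem.List.pyGet? (q :: qs) (i + 1)
        pure (res ++ [[b], p])) res).map List.flatten)
    = (rwbWeave (qs.drop j) (bs.drop j)).map (fun t => res.flatten ++ t) := by
  suffices H : ∀ (d j : Nat) (res : List (List Char)), qs.length - j = d →
      (((PySem.List.pyRange (j : Int) ((qs.length : Nat) : Int) 1).foldlM
        (fun (res : List (List Char)) (i : Int) => do
          let b ← PySem.List.pyGet? bs i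
          let p ← PySem.List.pyGet? (q :: qs) (i + 1)
          pure (res ++ [[b], p])) res).map List.flatten)
      = (rwbWeave (qs.drop j) (bs.drop j)).map (fun t => res.flatten ++ t) by
    intro j res; exact H _ j res rfl
  intro d
  induction d with
  | zero =>
    intro j res hd
    have hle : qs.length ≤ j := by omega
    have hr : PySem.List.pyRange (j : Int) ((qs.length : Nat) : Int) 1 = [] := by
      simp [PySem.List.pyRange]; omega
    have hqd : qs.drop j = [] := by
      rw [List.drop_eq_nil_iff]; omega
    simp [hr, hqd, rwbWeave]
  | succ d ih =>
    intro j res hd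
    have hlt : j < qs.length := by omega
    have hr : PySem.List.pyRange (j : Int) ((qs.length : Nat) : Int) 1
        = (j : Int) :: PySem.List.pyRange ((j : Int) + 1) ((qs.length : Nat) : Int) 1 := by
      exact PySem.List.pyRange_one_cons (by exact_mod_cast hlt)
    rw [hr]
    have hq : PySem.List.pyGet? (q :: qs) ((j : Int) + 1) = some qs[j] := by
      have : ((j : Int) + 1) = ((j + 1 : Nat) : Int) := by push_cast; ring
      rw [this, PySem.List.pyGet?_natCast]
      simp [List.getElem?_cons_succ, List.getElem?_eq_getElem hlt]
    have hbj : PySem.List.pyGet? bs (j : Int) = bs[j]? := by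
      simp [PySem.List.pyGet?_natCast]
    have hcast : ((j : Int) + 1) = ((j + 1 : Nat) : Int) := by push_cast; ring
    rcases hdropb : bs.drop j with _ | ⟨b, brest⟩
    · have hnone : bs[j]? = none := by
        rw [List.getElem?_eq_none_iff]
        have := List.drop_eq_nil_iff.mp hdropb
        omega
      have hqd : qs.drop j = qs[j] :: qs.drop (j + 1) := List.drop_eq_getElem_cons hlt
      rw [hqd]
      simp only [List.foldlM_cons, hbj, hnone, rwbWeave]
      simp
    · have hb : bs[j]? = some b := by
        have h0 := (List.getElem?_drop (i := j) (j := 0) (xs := bs)).symm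
        simp only [hdropb, Nat.add_zero] at h0
        simpa using h0
      have hdropb1 : bs.drop (j + 1) = brest := by
        have h1 : bs.drop (j + 1) = (bs.drop j).drop 1 := by
          rw [List.drop_drop (i := 1) (j := j) (l := bs)]
        rw [h1, hdropb]; rfl
      have hqd : qs.drop j = qs[j] :: qs.drop (j + 1) := List.drop_eq_getElem_cons hlt
      have hstep := ih (j + 1) (res ++ [[b], qs[j]]) (by omega)
      rw [← hcast] at hstep
      simp only [List.foldlM_cons, hbj, hb, hq, Option.pure_def, Option.bind_eq_bind, Option.bind_some]
      simp only [Option.pure_def, Option.bind_eq_bind] at hstep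
      rw [hstep, hdropb1, hqd]
      simp only [rwbWeave]
      cases rwbWeave (qs.drop (j+1)) brest <;> simp

theorem altGo_eq_weave (bs : List Char) (h : List Char) (t : List (List Char)) :
    replaceWithBinaryAltGo (h :: t) bs = (rwbWeave t bs).map (h ++ ·) := by
  have hp0 : PySem.List.pyGet? (h :: t) (0 : Int) = some h := by
    have h0 : (0 : Int) = ((0 : Nat) : Int) := rfl
    rw [h0, PySem.List.pyGet?_natCast]; rfl
  have hlen : (((h :: t).length : Nat) : Int) - 1 = ((t.length : Nat) : Int) := by
    simp
  unfold replaceWithBinaryAltGo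
  rw [hp0, hlen]
  have hfold := foldB h t bs 0 [h]
  simp only [Nat.cast_zero, List.drop_zero] at hfold
  simp only [Option.pure_def, Option.bind_eq_bind, Option.bind_some] at hfold ⊢
  -- turn final bind-pure into map and apply hfold
  rcases hres : (PySem.List.pyRange 0 ((t.length : Nat) : Int) 1).foldlM
      (fun (res : List (List Char)) (i : Int) =>
        (PySem.List.pyGet? bs i).bind fun b =>
          (PySem.List.pyGet? (h :: t) (i + 1)).bind fun p => some (res ++ [[b], p])) [h]
      with _ | res'
  · rw [hres] at hfold
    simp at hfold
    cases hw : rwbWeave t bs <;> simp [hw] at hfold ⊢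
  · rw [hres] at hfold
    simp at hfold ⊢
    cases hw : rwbWeave t bs <;> simp [hw] at hfold ⊢
    exact hfold

-- ===== VERDICT (by name: the statement is the Claim_ definition above) =====
theorem replaceWithBinary_spec : Claim_equal_replaceWithBinary := by
  intro row binaryString _ _
  unfold Spec_replaceWithBinary replaceWithBinary replaceWithBinary_alt
  rw [splitOn_eq_rwbSplit]
  rcases hsp : rwbSplit row.toList with _ | ⟨h, t⟩
  · exact absurd hsp (rwbSplit_ne_nil row.toList)
  · rw [altGo_eq_weave binaryString.toList h t,
        ← weave_spec row.toList binaryString.toList h t hsp]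
    have hA := loopA_spec binaryString.toList row.toList [] 0
    simp only [Nat.cast_zero, List.drop_zero] at hA
    rw [hA]
    cases rwbSpec row.toList binaryString.toList <;> simp
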